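-- pv_equiv track=rewrite | github.com/doocs/leetcode | solution/1900-1999/1946.Largest Number After Mutating Substring/Solution.py | maximumNumber
-- ===== SOURCE A (Python) =====
-- from typing import List
--
-- def maximumNumber(num: str, change: List[int]) -> str:
--     find = False
--     nums = list(num)
--     for i, c in enumerate(num):
--         if int(c) < change[int(c)]:
--             nums[i] = str(change[int(c)])
--             find = True
--         elif find and int(c) == change[int(c)]:
--             continue
--         elif find:
--             break
--     return ''.join(nums)
-- ===== SOURCE B (Python) =====
-- def maximumNumber(num, change):
--     digits = [int(c) for c in num]
--     gt = [change[d] > d for d in digits]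
--     ge = [change[d] >= d for d in digits]
--     i = gt.index(True) if True in gt else len(num)
--     tail = ge[i:]
--     j = i + (tail.index(False) if False in tail else len(tail))
--     mid = ''.join(str(change[d]) for d in digits[i:j])
--     return num[:i] + mid + num[j:]
-- ===== Notes on version B (the rewrite author's own statement) =====
-- stated objective: alternative
-- what changed: Replaces A's single flag-driven loop that mutates a char list in place by a data-parallel mask-and-splice formulation: it maps the string to its digit list, materialises the whole gt/ge comparison masks as boolean lists, locates the mutation window boundaries i and j with the list index() primitive on those masks, and rebuilds the answer from slices num[:i] + join(mutated window) + num[j:].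
-- outside the precondition, e.g. on maximumNumber('120x', [9, 8, 0]): A returns '820x', B raises ValueError
import Mathlib
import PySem

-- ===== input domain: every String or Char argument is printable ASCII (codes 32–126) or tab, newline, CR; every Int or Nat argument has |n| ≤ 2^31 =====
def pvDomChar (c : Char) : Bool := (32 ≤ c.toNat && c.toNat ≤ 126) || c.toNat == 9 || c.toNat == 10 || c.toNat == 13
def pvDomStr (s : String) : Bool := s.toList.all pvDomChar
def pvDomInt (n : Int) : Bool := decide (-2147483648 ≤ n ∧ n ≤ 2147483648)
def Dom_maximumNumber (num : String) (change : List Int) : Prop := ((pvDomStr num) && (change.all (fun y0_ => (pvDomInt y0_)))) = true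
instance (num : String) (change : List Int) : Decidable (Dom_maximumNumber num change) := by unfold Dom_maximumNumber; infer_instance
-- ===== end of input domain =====

-- B replaces A's single flag-driven mutating loop by a mask-and-splice formulation: it maps the
-- digits, builds the gt/ge comparison masks as whole lists, locates the window boundaries with
-- index(), and rebuilds the string from slices; equivalence of RETURN values is proved on inputs
-- where neither program raises.

-- ===== PORT A =====
-- change[d] for an Int d; Pre_ ensures the index is in range, where this is exact
def pvChgI (change : List Int) (d : Int) : Int := (PySem.List.pyGet? change d).getD 0
-- int(c) for a one-character string; Pre_ ensures c is a digit, where this is exact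
def pvIntOf (c : Char) : Int := (PySem.Int.ofChars? [c]).getD 0
-- change[int(c)]
def pvChg (change : List Int) (c : Char) : Int := pvChgI change (pvIntOf c)

-- A's loop over enumerate(num) with the mutable list nums (entries kept as char lists, since
-- str(change[d]) may be several characters) and the flag `find`; `break` leaves the tail as is
def pvARec (change : List Int) : List Char → Bool → List (List Char)
  | [], _ => []
  | c :: rest, find =>
    if pvIntOf c < pvChg change c then
      PySem.Int.toChars (pvChg change c) :: pvARec change rest true
    else if find = true ∧ pvIntOf c = pvChg change c then
      [c] :: pvARec change rest find
    else if find then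
      [c] :: rest.map (fun x => [x])
    else
      [c] :: pvARec change rest find

def maximumNumber (num : String) (change : List Int) : String :=
  String.ofList (PySem.Chars.join [] (pvARec change num.toList false))

-- ===== PORT B =====
-- digits = [int(c) for c in num]; gt/ge masks; i, j via index() with an `in` guard; splice slices
def maximumNumber_alt (num : String) (change : List Int) : String :=
  let digits := num.toList.map pvIntOf
  let gt := digits.map (fun d => decide (pvChgI change d > d))
  let ge := digits.map (fun d => decide (pvChgI change d ≥ d))
  let i : Nat := match PySem.List.index? gt true with | some k => k | none => num.toList.length
  let tail := PySem.List.slice ge (some (i : Int)) none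
  let j : Nat := i + (match PySem.List.index? tail false with | some k => k | none => tail.length)
  let mid := PySem.Chars.join []
    ((PySem.List.slice digits (some (i : Int)) (some (j : Int))).map
      (fun d => PySem.Int.toChars (pvChgI change d)))
  String.ofList (PySem.List.slice num.toList none (some (i : Int)) ++ mid ++
    PySem.List.slice num.toList (some (j : Int)) none)

-- ===== PRECONDITION & SPEC =====
-- Pre_ requires every character to be a digit with change[int(c)] in range: outside it A raises
-- (ValueError/IndexError) except when the bad character lies after A's break point — there A
-- still returns but B, which evaluates all positions up front, raises, so those inputs are excluded.
def Pre_maximumNumber (num : String) (change : List Int) : Prop :=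
  num.toList.all (fun c => decide ('0' ≤ c ∧ c ≤ '9') && decide ((c.toNat : Int) - 48 < (change.length : Int))) = true
instance (num : String) (change : List Int) : Decidable (Pre_maximumNumber num change) := by
  unfold Pre_maximumNumber; infer_instance

def pvWitness_maximumNumber : String × List Int := ("132", [0, 9, 9, 9, 9, 9, 9, 9, 9, 9])

def Spec_maximumNumber (num : String) (change : List Int) (out : String) : Prop := out = maximumNumber_alt num change
instance (num : String) (change : List Int) (out : String) : Decidable (Spec_maximumNumber num change out) := by unfold Spec_maximumNumber; infer_instance

-- ===== CLAIM (what is proved, stated in full; the proofs are below) =====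
def Claim_equal_maximumNumber : Prop := ∀ (num : String) (change : List Int), Dom_maximumNumber num change → Pre_maximumNumber num change → Spec_maximumNumber num change (maximumNumber num change)

-- ===== LEMMAS AND PROOFS =====

-- a digit character round-trips: str(int(c)) = c
lemma pv_toChars_intOf (c : Char) (h1 : '0' ≤ c) (h2 : c ≤ '9') :
    PySem.Int.toChars (pvIntOf c) = [c] := by
  simp only [Char.le_def] at h1 h2
  have h48 : 48 ≤ c.toNat := h1
  have h57 : c.toNat ≤ 57 := h2
  have hofnat := Char.ofNat_toNat c
  interval_cases h : c.toNat <;> (rw [← hofnat]; decide)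

lemma pv_flatten_singletons (l : List Char) : (l.map (fun x => [x])).flatten = l := by
  induction l <;> simp_all

lemma pv_join_flatten (ps : List (List Char)) : PySem.Chars.join [] ps = ps.flatten := by
  induction ps with
  | nil => rfl
  | cons h t ih =>
    simp [PySem.Chars.join, List.intercalate] at *
    cases t <;> simp_all [List.intersperse]

-- Python's `l.index(v) if v in l else len(l)` equals the length of the longest v-free prefix
lemma pvIdxD (v : Bool) (l : List Bool) :
    (match PySem.List.index? l v with | some k => k | none => l.length) =
      (l.takeWhile (fun b => !(b == v))).length := by
  induction l with
  | nil => simp [PySem.List.index?, List.idxOf?]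
  | cons b r ih =>
    by_cases hb : b = v
    · subst hb; rw [PySem.List.index?_cons_self]; simp
    · rw [PySem.List.index?_cons_of_ne _ hb]
      cases h : PySem.List.index? r v with
      | none => rw [h] at ih; simpa [hb] using ih
      | some k => rw [h] at ih; simpa [hb] using ih

lemma pv_take_lenTakeWhile {α : Type} (p : α → Bool) (l : List α) :
    l.take (l.takeWhile p).length = l.takeWhile p := by
  induction l with
  | nil => rfl
  | cons c r ih => by_cases h : p c <;> simp [List.takeWhile, h, ih]

lemma pv_drop_lenTakeWhile {α : Type} (p : α → Bool) (l : List α) :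
    l.drop (l.takeWhile p).length = l.dropWhile p := by
  induction l with
  | nil => rfl
  | cons c r ih => by_cases h : p c <;> simp [List.takeWhile, List.dropWhile, h, ih]

lemma pv_takeWhile_map {a b : Type} (f : a → b) (g : b → Bool) (l : List a) :
    (l.map f).takeWhile g = (l.takeWhile (fun c => g (f c))).map f := by
  induction l with
  | nil => rfl
  | cons c r ih => by_cases h : g (f c) <;> simp [List.takeWhile, h, ih]

lemma pv_map_drop {a b : Type} (f : a → b) (n : Nat) (l : List a) :
    (l.map f).drop n = (l.drop n).map f := (List.map_drop ..).symm

lemma pv_map_take {a b : Type} (f : a → b) (n : Nat) (l : List a) :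
    (l.map f).take n = (l.take n).map f := (List.map_take ..).symm

lemma pvIdxMapD (f : Char → Bool) (v : Bool) (l : List Char) :
    (match PySem.List.index? (l.map f) v with | some k => k | none => l.length) =
      (l.takeWhile (fun c => !(f c == v))).length := by
  have h := pvIdxD v (l.map f)
  rw [List.length_map] at h
  rw [h, pv_takeWhile_map, List.length_map]

-- A's loop with find = True: mutate while int(c) ≤ change[int(c)], then leave the tail as is
lemma pvA_true (change : List Int) (l : List Char)
    (hp : ∀ c ∈ l, ('0' ≤ c ∧ c ≤ '9')) :
    pvARec change l true =
      (l.takeWhile (fun c => decide (pvIntOf c ≤ pvChg change c))).map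
          (fun c => PySem.Int.toChars (pvChg change c)) ++
        (l.dropWhile (fun c => decide (pvIntOf c ≤ pvChg change c))).map (fun x => [x]) := by
  induction l with
  | nil => rfl
  | cons c r ih =>
    have hc := hp c (List.mem_cons_self ..)
    have hr : ∀ x ∈ r, ('0' ≤ x ∧ x ≤ '9') := fun x hx => hp x (List.mem_cons_of_mem _ hx)
    by_cases hlt : pvIntOf c < pvChg change c
    · have hle : pvIntOf c ≤ pvChg change c := le_of_lt hlt
      simp [pvARec, List.takeWhile, List.dropWhile, hlt, hle, ih hr]
    · by_cases heq : pvIntOf c = pvChg change c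
      · have hle : pvIntOf c ≤ pvChg change c := le_of_eq heq
        have hx : PySem.Int.toChars (pvChg change c) = [c] := by
          rw [← heq]; exact pv_toChars_intOf c hc.1 hc.2
        simp [pvARec, List.takeWhile, List.dropWhile, heq, hx, ih hr]
      · have hnle : ¬ pvIntOf c ≤ pvChg change c := fun hle =>
          heq (le_antisymm hle (le_of_not_gt fun h => hlt h))
        simp [pvARec, List.takeWhile, List.dropWhile, hlt, heq, hnle]

-- A's loop with find = False: skip while change[int(c)] ≤ int(c), then run with find = True
lemma pvA_false (change : List Int) (l : List Char) :
    pvARec change l false =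
      (l.takeWhile (fun c => decide (pvChg change c ≤ pvIntOf c))).map (fun x => [x]) ++
        pvARec change (l.dropWhile (fun c => decide (pvChg change c ≤ pvIntOf c))) true := by
  induction l with
  | nil => rfl
  | cons c r ih =>
    by_cases hle : pvChg change c ≤ pvIntOf c
    · have hlt : ¬ pvIntOf c < pvChg change c := not_lt.mpr hle
      simp [pvARec, List.takeWhile, List.dropWhile, hle, hlt, ih]
    · have hlt : pvIntOf c < pvChg change c := lt_of_not_ge hle
      simp [pvARec, List.takeWhile, List.dropWhile, hle, hlt]

-- ===== VERDICT (by name: the statement is the Claim_ definition above) =====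
theorem maximumNumber_spec : Claim_equal_maximumNumber := by
  intro num change _ hpre0
  have hpre : ∀ c ∈ num.toList, ('0' ≤ c ∧ c ≤ '9') := by
    intro c hc
    have h := List.all_eq_true.mp hpre0 c hc
    exact of_decide_eq_true (Bool.and_elim_left h)
  unfold Spec_maximumNumber maximumNumber maximumNumber_alt
  set l := num.toList with hl
  set p : Char → Bool := fun c => decide (pvChg change c ≤ pvIntOf c) with hp_def
  set q : Char → Bool := fun c => decide (pvIntOf c ≤ pvChg change c) with hq_def
  have hqmem : ∀ c ∈ l.dropWhile p, ('0' ≤ c ∧ c ≤ '9') := fun c hc =>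
    hpre c ((List.dropWhile_sublist p (l := l)).subset hc)
  -- compute B's index i
  have hi : (match PySem.List.index?
      ((l.map pvIntOf).map (fun d => decide (pvChgI change d > d))) true with
      | some k => k | none => l.length) = (l.takeWhile p).length := by
    rw [List.map_map]
    have h := pvIdxMapD ((fun d => decide (pvChgI change d > d)) ∘ pvIntOf) true l
    rw [h]
    have hfun : (fun c => !((fun d => decide (pvChgI change d > d)) ∘ pvIntOf) c == true) = p := by
      funext c
      simp [hp_def, pvChg, Function.comp, ← decide_not, not_lt]
    rw [hfun]
  rw [pv_join_flatten, pvA_false change l, pvA_true change _ hqmem]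
  simp only [List.flatten_append, pv_flatten_singletons]
  simp only [hi]
  have hslice2 : PySem.List.slice ((l.map pvIntOf).map (fun d => decide (pvChgI change d ≥ d)))
      (some ((List.takeWhile p l).length : Int)) none = (l.dropWhile p).map q := by
    rw [PySem.List.slice_from_natCast, List.map_map, pv_map_drop, pv_drop_lenTakeWhile]
    have hgeq : ((fun d => decide (pvChgI change d ≥ d)) ∘ pvIntOf) = q := by
      funext c
      simp [hq_def, pvChg, Function.comp, ge_iff_le]
    rw [hgeq]
  rw [hslice2]
  have hj : (match PySem.List.index? ((l.dropWhile p).map q) false with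
      | some k => k | none => ((l.dropWhile p).map q).length) =
      ((l.dropWhile p).takeWhile q).length := by
    rw [pvIdxD false ((l.dropWhile p).map q), pv_takeWhile_map]
    simp
  rw [hj]
  rw [PySem.List.slice_from_natCast, PySem.List.slice_to_natCast, pv_take_lenTakeWhile]
  rw [← List.drop_drop, pv_drop_lenTakeWhile p, pv_drop_lenTakeWhile q]
  rw [Nat.cast_add, PySem.List.slice_natCast_add]
  rw [pv_map_drop, pv_drop_lenTakeWhile p, pv_map_take, pv_take_lenTakeWhile]
  rw [pv_join_flatten, List.map_map]
  simp [hp_def, hq_def, pvChg, Function.comp_def]
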